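-- pv_equiv track=rewrite | github.com/codewithashhal/Color-Sorting-Game | ColorSorting.py | calc_move
-- ===== SOURCE A (Python) =====
-- def calc_move(colors, selected_rect, destination):
--     same_color = True
--     length = 1
--     color_to_move = None
--
--     if len(colors[selected_rect]) > 0:
--         color_to_move = colors[selected_rect][-1]
--         for i in range(1, len(colors[selected_rect])):
--             if same_color and colors[selected_rect][-1 - i] == color_to_move:
--                 length += 1
--             else:
--                 break
--
--     if len(colors[destination]) < 4:
--         if len(colors[destination]) == 0:
--             color_on_top = color_to_move
--         else:
--             color_on_top = colors[destination][-1]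
--
--         if color_on_top == color_to_move:
--             for _ in range(length):
--                 if len(colors[destination]) < 4 and len(colors[selected_rect]) > 0:
--                     colors[destination].append(color_on_top)
--                     colors[selected_rect].pop()
--
--     return colors
-- ===== SOURCE B (Python) =====
-- def calc_move(colors, selected_rect, destination):
--     # Note: like A, mutates colors in place (same final state) and returns it.
--     src = colors[selected_rect]
--     dst = colors[destination]
--     if src is dst or not src or len(dst) >= 4:
--         return colors
--     color = src[-1]
--     if dst and dst[-1] != color:
--         return colors
--     while src and len(dst) < 4 and src[-1] == color:
--         dst.append(color)
--         src.pop()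
--     return colors
-- ===== Notes on version B (the rewrite author's own statement) =====
-- stated objective: simpler
-- what changed: B drops A's separate run-length counting loop and per-iteration capacity re-checks: it early-returns on aliased/empty/full/mismatched tubes and transfers the contiguous top run in one guarded while-loop.
import Mathlib
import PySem

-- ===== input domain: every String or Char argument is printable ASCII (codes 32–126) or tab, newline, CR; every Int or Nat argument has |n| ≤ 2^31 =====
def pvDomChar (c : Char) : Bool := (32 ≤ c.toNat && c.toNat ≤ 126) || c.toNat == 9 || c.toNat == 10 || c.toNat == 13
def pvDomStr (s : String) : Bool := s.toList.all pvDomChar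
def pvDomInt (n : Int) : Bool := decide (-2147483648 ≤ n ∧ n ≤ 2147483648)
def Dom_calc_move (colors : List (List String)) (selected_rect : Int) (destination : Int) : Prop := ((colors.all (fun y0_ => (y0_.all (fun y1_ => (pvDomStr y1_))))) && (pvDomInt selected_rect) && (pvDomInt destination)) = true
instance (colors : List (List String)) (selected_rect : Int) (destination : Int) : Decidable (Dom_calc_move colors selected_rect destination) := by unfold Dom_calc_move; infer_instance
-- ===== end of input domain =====

-- B drops A's run-length pre-count: it early-returns on aliased/empty/full/mismatched tubes and
-- moves the top run in a single guarded while-loop (objective: simpler). Both A and B mutate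
-- `colors` in place identically and return it; the theorems are about the returned value.

-- ===== PORT A =====
-- Python list index resolution (valid under Pre_): negative indices count from the end.
def pvIdx (n : Nat) (i : Int) : Nat := if i < 0 then (i + n).toNat else i.toNat

-- A's run-counting for-loop (i from 1; `same_color` is never set False, `break` ends the loop).
def aRunGo (src : List String) (c : String) (i : Nat) (len : Nat) : Nat :=
  if _h : i < src.length then
    if PySem.List.pyGet? src (-1 - (i : Int)) = some c then aRunGo src c (i + 1) (len + 1)
    else len
  else len
termination_by src.length - i

-- A's move for-loop: `length` iterations, each re-checking both lengths on the current state,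
-- then appending to colors[destination] and popping colors[selected_rect] (indices resolved).
def aMoveGo (s d : Nat) (c : String) (k : Nat) (cs : List (List String)) : List (List String) :=
  match k with
  | 0 => cs
  | k + 1 =>
    let dl := cs.getD d []
    let sl := cs.getD s []
    if dl.length < 4 ∧ 0 < sl.length then
      let cs1 := cs.set d (dl ++ [c])
      let cs2 := cs1.set s ((cs1.getD s []).dropLast)
      aMoveGo s d c k cs2
    else aMoveGo s d c k cs

def calc_move (colors : List (List String)) (selected_rect : Int) (destination : Int) : List (List String) :=
  let s := pvIdx colors.length selected_rect
  let d := pvIdx colors.length destination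
  let src0 := colors.getD s []
  let lc : Nat × Option String :=
    if 0 < src0.length then
      let c := src0.getLast?.getD ""
      (aRunGo src0 c 1 1, some c)
    else (1, none)
  let dst0 := colors.getD d []
  if dst0.length < 4 then
    let color_on_top : Option String := if dst0.length = 0 then lc.2 else dst0.getLast?
    if color_on_top = lc.2 then
      aMoveGo s d (color_on_top.getD "") lc.1 colors
    else colors
  else colors

-- ===== PORT B =====
-- B's while-loop: while src and len(dst) < 4 and src[-1] == color: dst.append(color); src.pop().
def bLoop (src dst : List String) (c : String) : List String × List String :=
  if _h : src.getLast? = some c ∧ dst.length < 4 then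
    bLoop src.dropLast (dst ++ [c]) c
  else (src, dst)
termination_by src.length
decreasing_by
  rcases src with _ | t <;> simp_all [List.length_dropLast]

def calc_move_alt (colors : List (List String)) (selected_rect : Int) (destination : Int) : List (List String) :=
  let s := pvIdx colors.length selected_rect
  let d := pvIdx colors.length destination
  if s = d then colors
  else
    let src := colors.getD s []
    let dst := colors.getD d []
    if src.isEmpty ∨ 4 ≤ dst.length then colors
    else
      let c := src.getLast?.getD ""
      if dst ≠ [] ∧ dst.getLast? ≠ some c then colors
      else
        let p := bLoop src dst c
        (colors.set d p.2).set s p.1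

-- ===== PRECONDITION & SPEC =====
-- Pre_ excludes exactly the inputs where A raises IndexError (a tube index out of range).
def Pre_calc_move (colors : List (List String)) (selected_rect : Int) (destination : Int) : Prop :=
  PySem.Raise.InRange colors.length selected_rect ∧ PySem.Raise.InRange colors.length destination
instance (colors : List (List String)) (selected_rect : Int) (destination : Int) : Decidable (Pre_calc_move colors selected_rect destination) := by unfold Pre_calc_move; infer_instance

def pvWitness_calc_move : List (List String) × Int × Int := ([["R", "R"], ["B"]], 0, 1)

def Spec_calc_move (colors : List (List String)) (selected_rect : Int) (destination : Int) (out : List (List String)) : Prop := out = calc_move_alt colors selected_rect destination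
instance (colors : List (List String)) (selected_rect : Int) (destination : Int) (out : List (List String)) : Decidable (Spec_calc_move colors selected_rect destination out) := by unfold Spec_calc_move; infer_instance

-- ===== CLAIM (what is proved, stated in full; the proofs are below) =====
def Claim_equal_calc_move : Prop := ∀ (colors : List (List String)) (selected_rect : Int) (destination : Int), Dom_calc_move colors selected_rect destination → Pre_calc_move colors selected_rect destination → Spec_calc_move colors selected_rect destination (calc_move colors selected_rect destination)

-- ===== LEMMAS AND PROOFS =====

theorem set_getD_self {α : Type} (l : List α) (i : Nat) (x : α) (h : i < l.length) :
    l.set i (l.getD i x) = l := by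
  apply List.ext_getElem
  · simp
  · intro j hj hj'
    simp only [List.getElem_set]
    split
    · subst j; simp [List.getD_eq_getElem?_getD, List.getElem?_eq_getElem h]
    · rfl

theorem set_collapse {α : Type} (l : List α) (d s : Nat) (x a b2 b1 : α) (hsd : s ≠ d) :
    (((l.set d x).set s a).set d b2).set s b1 = (l.set d b2).set s b1 := by
  apply List.ext_getElem
  · simp
  · intro j hj hj'
    simp only [List.getElem_set]
    by_cases hjs : j = s <;> by_cases hjd : j = d <;> simp_all

theorem pvIdx_lt {n : Nat} {i : Int} (h : PySem.Raise.InRange n i) : pvIdx n i < n := by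
  obtain ⟨h1, h2⟩ := h; unfold pvIdx; split <;> omega

-- Aliased tubes: each iteration of A's move loop appends and then pops the same list, a no-op.
theorem aMoveGo_self (s : Nat) (c : String) (k : Nat) (cs : List (List String)) (h : s < cs.length) :
    aMoveGo s s c k cs = cs := by
  induction k with
  | zero => rfl
  | succ k ih =>
    simp only [aMoveGo]
    split_ifs with hg
    · have h1 : (cs.set s (cs.getD s [] ++ [c])).getD s [] = cs.getD s [] ++ [c] := by
        simp [List.getD_eq_getElem?_getD, List.getElem?_set_self h]
      rw [h1, List.dropLast_concat, List.set_set, set_getD_self _ _ _ h, ih]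
    · exact ih

-- Once the destination is full, the remaining iterations of A's move loop do nothing.
theorem aMoveGo_full (s d : Nat) (c : String) (k : Nat) (cs : List (List String))
    (h : 4 ≤ (cs.getD d []).length) : aMoveGo s d c k cs = cs := by
  induction k with
  | zero => rfl
  | succ k ih =>
    simp only [aMoveGo]
    rw [if_neg (by omega)]
    exact ih

theorem bLoop_stop (src dst : List String) (c : String)
    (h : ¬ (src.getLast? = some c ∧ dst.length < 4)) : bLoop src dst c = (src, dst) := by
  rw [bLoop, dif_neg h]

theorem bLoop_step (src dst : List String) (c : String)
    (h : src.getLast? = some c ∧ dst.length < 4) :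
    bLoop src dst c = bLoop src.dropLast (dst ++ [c]) c := by
  rw [bLoop, dif_pos h]

-- Main loop correspondence: on distinct valid tubes, A's counted move loop equals B's while
-- loop followed by writing the two final tubes back.
theorem move_eq (s d : Nat) (c : String) (hsd : s ≠ d) :
    ∀ (k : Nat) (u dst : List String) (cs : List (List String)),
      s < cs.length → d < cs.length →
      cs.getD s [] = u ++ List.replicate k c → cs.getD d [] = dst → u.getLast? ≠ some c →
      aMoveGo s d c k cs =
        (cs.set d (bLoop (u ++ List.replicate k c) dst c).2).set s
          (bLoop (u ++ List.replicate k c) dst c).1 := by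
  intro k
  induction k with
  | zero =>
    intro u dst cs hs hd hsrc hdst hu
    rw [bLoop_stop _ _ _ (by simp [hu])]
    show cs = (cs.set d dst).set s (u ++ List.replicate 0 c)
    rw [← hdst, ← hsrc, set_getD_self _ _ _ hd, set_getD_self _ _ _ hs]
  | succ k ih =>
    intro u dst cs hs hd hsrc hdst hu
    by_cases h4 : dst.length < 4
    · have hlast : (u ++ List.replicate (k + 1) c).getLast? = some c := by
        rw [List.replicate_succ', ← List.append_assoc, List.getLast?_concat]
      have hsplit : (u ++ List.replicate (k + 1) c).dropLast = u ++ List.replicate k c := by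
        rw [List.replicate_succ', ← List.append_assoc, List.dropLast_concat]
      rw [bLoop_step _ _ _ ⟨hlast, h4⟩, hsplit]
      simp only [aMoveGo]
      rw [if_pos ⟨by rw [hdst]; exact h4, by rw [hsrc]; simp⟩]
      have hg1 : (cs.set d (cs.getD d [] ++ [c])).getD s [] = cs.getD s [] := by
        simp [List.getD_eq_getElem?_getD, List.getElem?_set_ne (Ne.symm hsd)]
      rw [hg1, hsrc, hsplit]
      have hlen : s < ((cs.set d (cs.getD d [] ++ [c])).set s (u ++ List.replicate k c)).length := by
        simpa using hs
      have hlend : d < ((cs.set d (cs.getD d [] ++ [c])).set s (u ++ List.replicate k c)).length := by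
        simpa using hd
      have hA : s < (cs.set d (cs.getD d [] ++ [c])).length := by simpa using hs
      have hcs2s : ((cs.set d (cs.getD d [] ++ [c])).set s (u ++ List.replicate k c)).getD s []
          = u ++ List.replicate k c := by
        rw [List.getD_eq_getElem?_getD, List.getElem?_set_self hA]; rfl
      have hcs2d : ((cs.set d (cs.getD d [] ++ [c])).set s (u ++ List.replicate k c)).getD d []
          = dst ++ [c] := by
        rw [List.getD_eq_getElem?_getD, List.getElem?_set_ne hsd, List.getElem?_set_self hd]
        simp only [Option.getD_some]
        rw [hdst]
      rw [ih u (dst ++ [c]) _ hlen hlend hcs2s hcs2d hu]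
      rw [set_collapse cs d s _ _ _ _ hsd]
    · rw [bLoop_stop _ _ _ (by simp [h4])]
      simp only [aMoveGo]
      rw [if_neg (by rw [hdst]; omega)]
      rw [aMoveGo_full s d c k cs (by rw [hdst]; omega)]
      show cs = (cs.set d dst).set s (u ++ List.replicate (k + 1) c)
      rw [← hdst, ← hsrc, set_getD_self _ _ _ hd, set_getD_self _ _ _ hs]

-- A's counting loop measured through the reversed list.
theorem aRunGo_eq (src : List String) (c : String) :
    ∀ (m i len : Nat), src.length - i ≤ m →
      aRunGo src c i len = len + ((src.reverse.drop i).takeWhile (· == c)).length := by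
  intro m
  induction m with
  | zero =>
    intro i len h
    have hi : ¬ i < src.length := by omega
    rw [aRunGo, dif_neg hi, List.drop_eq_nil_of_le (by simp; omega)]
    simp
  | succ m ih =>
    intro i len h
    by_cases hi : i < src.length
    · have hrev : i < src.reverse.length := by simpa using hi
      have hdrop : src.reverse.drop i = src[src.length - 1 - i] :: src.reverse.drop (i + 1) := by
        rw [List.drop_eq_getElem_cons hrev, List.getElem_reverse]
      have hget : PySem.List.pyGet? src (-1 - (i : Int)) = some src[src.length - 1 - i] := by
        have he : (-1 - (i : Int)) = -(((i + 1 : Nat)) : Int) := by push_cast; ring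
        rw [he, PySem.List.pyGet?_neg_natCast src (i + 1) (by omega) (by omega)]
        rw [show src.length - (i + 1) = src.length - 1 - i from by omega]
        rw [List.getElem?_eq_getElem (by omega)]
      rw [aRunGo, dif_pos hi]
      by_cases hc : src[src.length - 1 - i] = c
      · rw [if_pos (by rw [hget, hc])]
        rw [ih (i + 1) (len + 1) (by omega), hdrop]
        simp [hc]
        omega
      · rw [if_neg (by rw [hget]; simp [hc])]
        rw [hdrop]
        simp [hc]
    · rw [aRunGo, dif_neg hi, List.drop_eq_nil_of_le (by simp; omega)]
      simp

-- The count A computes is the length of the maximal run of the top colour.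
theorem run_split (src : List String) (c : String) (h : src.getLast? = some c) :
    ∃ u, src = u ++ List.replicate (aRunGo src c 1 1) c ∧ u.getLast? ≠ some c := by
  obtain ⟨t, ht⟩ : ∃ t, src.reverse = c :: t := by
    have hh : src.reverse.head? = some c := by rw [List.head?_reverse, h]
    rcases hr : src.reverse with _ | ⟨a, t⟩
    · rw [hr] at hh; simp at hh
    · rw [hr] at hh; simp at hh; exact ⟨t, by rw [hh]⟩
  have hL : aRunGo src c 1 1 = 1 + (t.takeWhile (· == c)).length := by
    rw [aRunGo_eq src c src.length 1 1 (by omega), ht]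
    simp
  have hw : t.takeWhile (· == c) = List.replicate (t.takeWhile (· == c)).length c := by
    apply List.eq_replicate_of_mem
    intro b hb
    simpa using List.mem_takeWhile_imp hb
  refine ⟨(t.dropWhile (· == c)).reverse, ?_, ?_⟩
  · calc src = src.reverse.reverse := by simp
    _ = (c :: t).reverse := by rw [ht]
    _ = t.reverse ++ [c] := by simp
    _ = ((t.takeWhile (· == c)) ++ (t.dropWhile (· == c))).reverse ++ [c] := by
        rw [List.takeWhile_append_dropWhile]
    _ = (t.dropWhile (· == c)).reverse ++ ((t.takeWhile (· == c)).reverse ++ [c]) := by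
        rw [List.reverse_append, List.append_assoc]
    _ = (t.dropWhile (· == c)).reverse ++ List.replicate (aRunGo src c 1 1) c := by
        rw [hL]
        congr 1
        conv_lhs => rw [hw]
        rw [List.reverse_replicate, ← List.replicate_succ', Nat.add_comm]
  · rw [List.getLast?_reverse]
    cases hd : (t.dropWhile (· == c)).head? with
    | none => simp
    | some x =>
      have hx := List.head?_dropWhile_not (· == c) t
      rw [hd] at hx
      intro e
      injection e with e'
      rw [e'] at hx
      simp at hx

theorem main_eq (colors : List (List String)) (sel dst : Int)
    (hs : pvIdx colors.length sel < colors.length)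
    (hd : pvIdx colors.length dst < colors.length) :
    calc_move colors sel dst = calc_move_alt colors sel dst := by
  simp only [calc_move, calc_move_alt]
  set s := pvIdx colors.length sel with hsdef
  set d := pvIdx colors.length dst with hddef
  set src0 := colors.getD s [] with hsrc0
  set dst0 := colors.getD d [] with hdst0
  clear_value src0 dst0 s d
  by_cases hsd : s = d
  · rw [if_pos hsd]
    subst hsd
    split_ifs <;> first | rfl | exact aMoveGo_self s _ _ colors hs
  · rw [if_neg hsd]
    by_cases hse : 0 < src0.length
    · have hne : src0 ≠ [] := by intro e; rw [e] at hse; simp at hse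
      rw [if_pos hse]
      have hc : src0.getLast? = some (src0.getLast?.getD "") := by
        rcases he : src0.getLast? with _ | x
        · exact absurd (List.getLast?_eq_none_iff.mp he) hne
        · rfl
      set c := src0.getLast?.getD "" with hcdef
      obtain ⟨u, hsplit, hu⟩ := run_split src0 c hc
      by_cases h4 : dst0.length < 4
      · rw [if_pos h4]
        rw [if_neg (show ¬(src0.isEmpty = true ∨ 4 ≤ dst0.length) from by
              rw [List.isEmpty_iff]
              rintro (h | h)
              · exact hne h
              · omega)]
        by_cases hd0 : dst0.length = 0
        · have hdnil : dst0 = [] := List.eq_nil_of_length_eq_zero hd0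
          rw [if_pos hd0, if_pos rfl]
          rw [if_neg (show ¬(dst0 ≠ [] ∧ dst0.getLast? ≠ some c) from by simp [hdnil])]
          have hm := move_eq s d c hsd (aRunGo src0 c 1 1) u dst0 colors hs hd
            (by rw [← hsrc0]; exact hsplit) (by rw [← hdst0]) hu
          rw [← hsplit] at hm
          simpa using hm
        · rw [if_neg hd0]
          have hdne : dst0 ≠ [] := by intro e; rw [e] at hd0; simp at hd0
          by_cases he : dst0.getLast? = some c
          · rw [if_pos (show dst0.getLast? = (aRunGo src0 c 1 1, some c).2 from by rw [he])]
            rw [if_neg (show ¬(dst0 ≠ [] ∧ dst0.getLast? ≠ some c) from by simp [he])]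
            have hm := move_eq s d c hsd (aRunGo src0 c 1 1) u dst0 colors hs hd
              (by rw [← hsrc0]; exact hsplit) (by rw [← hdst0]) hu
            rw [← hsplit] at hm
            rw [he]
            simpa using hm
          · rw [if_neg (show ¬(dst0.getLast? = (aRunGo src0 c 1 1, some c).2) from by
                  simpa using he)]
            rw [if_pos (show dst0 ≠ [] ∧ dst0.getLast? ≠ some c from ⟨hdne, he⟩)]
      · rw [if_neg h4]
        rw [if_pos (show (src0.isEmpty = true ∨ 4 ≤ dst0.length) from Or.inr (by omega))]
    · have hsnil : src0 = [] := by
        rcases src0 with _ | _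
        · rfl
        · simp at hse
      rw [if_neg hse]
      rw [if_pos (show (src0.isEmpty = true ∨ 4 ≤ dst0.length) from Or.inl (by simp [hsnil]))]
      by_cases h4 : dst0.length < 4
      · rw [if_pos h4]
        by_cases hd0 : dst0.length = 0
        · rw [if_pos hd0, if_pos rfl]
          simp only [aMoveGo]
          rw [if_neg (by rw [← hsrc0, hsnil]; simp)]
        · rw [if_neg hd0]
          have hdne : dst0 ≠ [] := by intro e; rw [e] at hd0; simp at hd0
          rw [if_neg (show ¬(dst0.getLast? = (1, (none : Option String)).2) from by
                rcases he : dst0.getLast? with _ | x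
                · exact absurd (List.getLast?_eq_none_iff.mp he) hdne
                · simp)]
      · rw [if_neg h4]

-- ===== VERDICT (by name: the statement is the Claim_ definition above) =====
theorem calc_move_spec : Claim_equal_calc_move := by
  intro colors sel dst _hdom hpre
  obtain ⟨hps, hpd⟩ := hpre
  exact main_eq colors sel dst (pvIdx_lt hps) (pvIdx_lt hpd)
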